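-- pv_equiv track=rewrite | github.com/terror/solutions | binarysearch/coincidence-search.py | solve
-- ===== SOURCE A (Python) =====
-- def solve(nums):
--   def b(t):
--     l, r = 0, len(nums) - 1
--     while l <= r:
--       m = (l + r) // 2
--       if nums[m] == t:
--         return True
--       if nums[m] < t:
--         l = m + 1
--       else:
--         r = m - 1
--     return False
--   return sum(map(lambda x: b(x), nums))
-- ===== SOURCE B (Python) =====
-- def solve(nums):
--     # One pass over the implicit binary-search tree: the search for t visits node m
--     # iff every right-turn ancestor value is < t and every left-turn ancestor value
--     # is > t, i.e. lo < t < hi for the running max/min bounds; t is found iff it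
--     # equals such a node's value.  Collect those values once, then count in one scan.
--     findable = set()
--     def walk(l, r, lo, hi):
--         if l > r:
--             return
--         m = (l + r) // 2
--         v = nums[m]
--         if (lo is None or lo < v) and (hi is None or v < hi):
--             findable.add(v)
--         walk(l, m - 1, lo, v if hi is None else min(hi, v))
--         walk(m + 1, r, v if lo is None else max(lo, v), hi)
--     walk(0, len(nums) - 1, None, None)
--     return sum(1 for x in nums if x in findable)
-- ===== Notes on version B (the rewrite author's own statement) =====
-- stated objective: faster
-- what changed: Instead of running a fresh binary search for every element (n searches of O(log n) each), B makes one recursion over the implicit binary-search tree, collecting into a set each node value that satisfies its path's running max/min bounds (exactly the values the search can find), then counts matches in a single scan.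
import Mathlib
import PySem

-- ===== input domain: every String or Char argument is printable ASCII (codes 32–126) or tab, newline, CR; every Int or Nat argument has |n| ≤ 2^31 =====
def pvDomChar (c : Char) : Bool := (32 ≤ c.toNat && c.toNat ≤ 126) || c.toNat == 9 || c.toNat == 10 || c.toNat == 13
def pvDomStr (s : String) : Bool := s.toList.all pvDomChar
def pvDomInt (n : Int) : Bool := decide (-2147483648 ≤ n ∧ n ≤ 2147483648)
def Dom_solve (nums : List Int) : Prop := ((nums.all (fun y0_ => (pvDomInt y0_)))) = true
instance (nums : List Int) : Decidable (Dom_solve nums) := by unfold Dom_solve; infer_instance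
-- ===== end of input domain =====

-- B replaces the per-element binary search by one recursion over the implicit search
-- tree collecting the set of findable values, then a single counting scan (alternative/faster).

-- ===== PORT A =====
-- inner function b(t): the while loop as recursion on (l, r); the fuel argument only
-- makes the recursion structural — it starts at the interval length and never runs out
def solveBSGo (nums : List Int) (t : Int) : Nat → Int → Int → Bool
  | 0, _, _ => false
  | fuel + 1, l, r =>
    if l ≤ r then
      let m := PySem.Int.floordiv (l + r) 2
      -- nums[m]: 0 ≤ l ≤ m ≤ r < len on every reachable state, so the default is never used
      let v := PySem.List.pyGetD nums m 0
      if v = t then true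
      else if v < t then solveBSGo nums t fuel (m + 1) r
      else solveBSGo nums t fuel l (m - 1)
    else false

def solve (nums : List Int) : Int :=
  -- sum(map(lambda x: b(x), nums))
  nums.foldl
    (fun acc x =>
      acc + (if solveBSGo nums x nums.length 0 (PySem.List.len nums - 1) then 1 else 0)) 0

-- ===== PORT B =====
-- (lo is None or lo < v) resp. (hi is None or v < hi)
def okLo : Option Int → Int → Bool
  | none, _ => true
  | some a, v => a < v

def okHi : Option Int → Int → Bool
  | none, _ => true
  | some b, v => v < b

-- v if hi is None else min(hi, v)
def minO : Option Int → Int → Int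
  | none, v => v
  | some b, v => min b v

-- v if lo is None else max(lo, v)
def maxO : Option Int → Int → Int
  | none, v => v
  | some a, v => max a v

-- def walk(l, r, lo, hi), threading the mutated set 'findable' as an accumulator;
-- fuel = interval length again only makes the recursion structural
def solveWalkGo (nums : List Int) : Nat → Int → Int → Option Int → Option Int →
    PySem.Set Int → PySem.Set Int
  | 0, _, _, _, _, s => s
  | fuel + 1, l, r, lo, hi, s =>
    if l ≤ r then
      let m := PySem.Int.floordiv (l + r) 2
      let v := PySem.List.pyGetD nums m 0
      let s1 := if okLo lo v && okHi hi v then s.add v else s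
      let s2 := solveWalkGo nums fuel l (m - 1) lo (some (minO hi v)) s1
      solveWalkGo nums fuel (m + 1) r (some (maxO lo v)) hi s2
    else s

def solve_alt (nums : List Int) : Int :=
  let findable :=
    solveWalkGo nums nums.length 0 (PySem.List.len nums - 1) none none PySem.Set.empty
  -- sum(1 for x in nums if x in findable)
  nums.foldl (fun acc x => acc + (if findable.contains x then 1 else 0)) 0

-- ===== PRECONDITION & SPEC =====
def Spec_solve (nums : List Int) (out : Int) : Prop := out = solve_alt nums
instance (nums : List Int) (out : Int) : Decidable (Spec_solve nums out) := by unfold Spec_solve; infer_instance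

-- ===== CLAIM (what is proved, stated in full; the proofs are below) =====
def Claim_equal_solve : Prop := ∀ (nums : List Int), Dom_solve nums → Spec_solve nums (solve nums)

-- ===== LEMMAS AND PROOFS =====

-- the walk only grows the accumulated set
lemma mem_solveWalkGo_mono (nums : List Int) (n : Nat) :
    ∀ (l r : Int) (lo hi : Option Int) (s : PySem.Set Int) (t : Int),
      t ∈ s → t ∈ solveWalkGo nums n l r lo hi s := by
  induction n with
  | zero => intro l r lo hi s t ht; exact ht
  | succ n ih =>
    intro l r lo hi s t ht
    rw [solveWalkGo]
    by_cases hlr : l ≤ r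
    · simp only [hlr, if_true]
      apply ih
      apply ih
      by_cases hc : okLo lo (PySem.List.pyGetD nums (PySem.Int.floordiv (l + r) 2) 0)
          && okHi hi (PySem.List.pyGetD nums (PySem.Int.floordiv (l + r) 2) 0)
      · simp only [hc, if_true]
        exact (PySem.Set.mem_add _ _ _).mpr (Or.inl ht)
      · simp only [hc]; exact ht
    · simp [hlr, ht]

-- every value the walk adds satisfies the bounds of its subtree
lemma mem_solveWalkGo_bounds (nums : List Int) (n : Nat) :
    ∀ (l r : Int) (lo hi : Option Int) (s : PySem.Set Int) (t : Int),
      t ∈ solveWalkGo nums n l r lo hi s →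
      t ∈ s ∨ (okLo lo t = true ∧ okHi hi t = true) := by
  induction n with
  | zero => intro l r lo hi s t ht; exact Or.inl ht
  | succ n ih =>
    intro l r lo hi s t ht
    rw [solveWalkGo] at ht
    by_cases hlr : l ≤ r
    · simp only [hlr, if_true] at ht
      set v := PySem.List.pyGetD nums (PySem.Int.floordiv (l + r) 2) 0 with hv
      rcases ih _ _ _ _ _ _ ht with h2 | ⟨hL, hH⟩
      · rcases ih _ _ _ _ _ _ h2 with h1 | ⟨hL, hH⟩
        · by_cases hc : okLo lo v && okHi hi v
          · simp only [hc, if_true] at h1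
            rcases (PySem.Set.mem_add _ _ _).mp h1 with h | rfl
            · exact Or.inl h
            · right; exact ⟨(Bool.and_eq_true _ _ ▸ hc).1, (Bool.and_eq_true _ _ ▸ hc).2⟩
          · simp only [hc] at h1; exact Or.inl h1
        · -- left subtree: lo unchanged, hi tightened to min — implies outer bounds
          right
          refine ⟨hL, ?_⟩
          cases hi with
          | none => rfl
          | some b =>
            simp only [okHi, minO, decide_eq_true_eq] at hH ⊢
            omega
      · -- right subtree: hi unchanged, lo tightened to max — implies outer bounds
        right
        refine ⟨?_, hH⟩
        cases lo with
        | none => rfl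
        | some a =>
          simp only [okLo, maxO, decide_eq_true_eq] at hL ⊢
          omega
    · simp [hlr] at ht
      exact Or.inl ht

-- key invariant: for a target t inside the bounds, membership in the walked set
-- is exactly "already in the accumulator, or the binary search finds t here"
lemma solveWalkGo_eq_bs (nums : List Int) (n : Nat) :
    ∀ (l r : Int) (lo hi : Option Int) (s : PySem.Set Int) (t : Int),
      (r + 1 - l).toNat ≤ n → okLo lo t = true → okHi hi t = true →
      (t ∈ solveWalkGo nums n l r lo hi s ↔ t ∈ s ∨ solveBSGo nums t n l r = true) := by
  induction n with
  | zero =>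
    intro l r lo hi s t hn hL hH
    simp [solveWalkGo, solveBSGo]
  | succ n ih =>
    intro l r lo hi s t hn hL hH
    rw [solveWalkGo, solveBSGo]
    by_cases hlr : l ≤ r
    · simp only [hlr, if_true]
      have hb := PySem.Int.floordiv_two_mid_bounds hlr
      set v := PySem.List.pyGetD nums (PySem.Int.floordiv (l + r) 2) 0 with hv
      by_cases hvt : v = t
      · -- found here: both sides true
        subst hvt
        have hc : (okLo lo v && okHi hi v) = true := by simp [hL, hH]
        rw [if_pos rfl, hc]
        constructor
        · intro _; exact Or.inr rfl
        · intro _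
          apply mem_solveWalkGo_mono
          apply mem_solveWalkGo_mono
          simp only [if_true]
          exact (PySem.Set.mem_add _ _ _).mpr (Or.inr rfl)
      · simp only [hvt, if_false]
        have hs1 : ∀ s' : PySem.Set Int,
            (t ∈ (if okLo lo v && okHi hi v then PySem.Set.add s' v else s') ↔ t ∈ s') := by
          intro s'
          by_cases hc : okLo lo v && okHi hi v
          · simp only [hc, if_true, PySem.Set.mem_add]
            constructor
            · rintro (h | rfl)
              · exact h
              · exact absurd rfl hvt
            · exact Or.inl
          · simp [hc]
        by_cases hlt : v < t
        · -- search goes right; the left subtree adds nothing with value t (t > v ≥ its hi)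
          simp only [hlt, if_true]
          have hL' : okLo (some (maxO lo v)) t = true := by
            cases lo with
            | none => simpa [okLo, maxO] using hlt
            | some a =>
              simp only [okLo, maxO, decide_eq_true_eq] at hL ⊢
              omega
          rw [ih _ _ _ _ _ _ (by omega) hL' hH]
          have h2 : t ∈ solveWalkGo nums n l (PySem.Int.floordiv (l + r) 2 - 1) lo
              (some (minO hi v)) (if okLo lo v && okHi hi v then PySem.Set.add s v else s) ↔
              t ∈ (if okLo lo v && okHi hi v then PySem.Set.add s v else s) := by
            constructor
            · intro h
              rcases mem_solveWalkGo_bounds nums n _ _ _ _ _ _ h with h | ⟨_, hH2⟩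
              · exact h
              · exfalso
                cases hi with
                | none => simp only [okHi, minO, decide_eq_true_eq] at hH2; omega
                | some b => simp only [okHi, minO, decide_eq_true_eq] at hH2; omega
            · exact mem_solveWalkGo_mono nums n _ _ _ _ _ _
          rw [h2, hs1]
        · -- search goes left; the right subtree adds nothing with value t (t < v ≤ its lo)
          simp only [hlt, if_false]
          have hgt : t < v := by omega
          have hH' : okHi (some (minO hi v)) t = true := by
            cases hi with
            | none => simpa [okHi, minO] using hgt
            | some b =>
              simp only [okHi, minO, decide_eq_true_eq] at hH ⊢
              omega
          have h3 : t ∈ solveWalkGo nums n (PySem.Int.floordiv (l + r) 2 + 1) r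
              (some (maxO lo v)) hi
              (solveWalkGo nums n l (PySem.Int.floordiv (l + r) 2 - 1) lo (some (minO hi v))
                (if okLo lo v && okHi hi v then PySem.Set.add s v else s)) ↔
              t ∈ solveWalkGo nums n l (PySem.Int.floordiv (l + r) 2 - 1) lo (some (minO hi v))
                (if okLo lo v && okHi hi v then PySem.Set.add s v else s) := by
            constructor
            · intro h
              rcases mem_solveWalkGo_bounds nums n _ _ _ _ _ _ h with h | ⟨hL2, _⟩
              · exact h
              · exfalso
                cases lo with
                | none => simp only [okLo, maxO, decide_eq_true_eq] at hL2; omega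
                | some a => simp only [okLo, maxO, decide_eq_true_eq] at hL2; omega
            · exact mem_solveWalkGo_mono nums n _ _ _ _ _ _
          rw [h3, ih _ _ _ _ _ _ (by omega) hL hH', hs1]
    · simp [hlr]

-- the collected set is exactly the set of values the binary search finds
lemma contains_findable (nums : List Int) (t : Int) :
    (solveWalkGo nums nums.length 0 (PySem.List.len nums - 1) none none
        PySem.Set.empty).contains t =
      solveBSGo nums t nums.length 0 (PySem.List.len nums - 1) := by
  have hfuel : (PySem.List.len nums - 1 + 1 - 0).toNat ≤ nums.length := by
    simp [PySem.List.len_eq]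
  have h := solveWalkGo_eq_bs nums nums.length 0 (PySem.List.len nums - 1) none none
      PySem.Set.empty t hfuel rfl rfl
  have h' : t ∈ solveWalkGo nums nums.length 0 (PySem.List.len nums - 1) none none
      PySem.Set.empty ↔ solveBSGo nums t nums.length 0 (PySem.List.len nums - 1) = true := by
    simpa [PySem.Set.empty] using h
  simp only [PySem.Set.contains, List.contains_eq_mem, h']
  simp

-- ===== VERDICT (by name: the statement is the Claim_ definition above) =====
theorem solve_spec : Claim_equal_solve := by
  intro nums _
  unfold Spec_solve solve solve_alt
  simp only [contains_findable]
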